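-- pv_equiv track=rewrite | github.com/L200170075/prak_asd_b | modul1.py | jmlvokal
-- ===== SOURCE A (Python) =====
-- def jmlvokal(string):
--     vok= 0
--     x = "aiueoAIUEO"
--     for car in string.lower():
--         if car in x:
--             vok +=1
--     vokal = len(string)
--     return(vokal,vok)
-- ===== SOURCE B (Python) =====
-- def jmlvokal(string):
--     low = string.lower()
--     vok = sum(low.count(v) for v in "aiueo")
--     return (len(string), vok)
-- ===== Notes on version B (the rewrite author's own statement) =====
-- stated objective: idiomatic
-- what changed: Replaces the per-character loop with a membership test by five str.count scans of the lowercased string, summed; the scans run in C, so the Python-level per-character work disappears.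
import Mathlib
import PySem

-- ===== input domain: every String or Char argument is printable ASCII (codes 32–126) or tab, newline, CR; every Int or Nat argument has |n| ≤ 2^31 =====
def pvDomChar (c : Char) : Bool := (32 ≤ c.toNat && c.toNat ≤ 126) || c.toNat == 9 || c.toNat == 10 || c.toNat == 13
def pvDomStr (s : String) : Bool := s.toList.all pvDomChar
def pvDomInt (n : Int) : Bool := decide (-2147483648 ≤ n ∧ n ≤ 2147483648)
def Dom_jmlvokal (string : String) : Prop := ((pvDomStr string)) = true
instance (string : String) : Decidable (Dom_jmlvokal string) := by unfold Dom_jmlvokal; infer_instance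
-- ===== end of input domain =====

-- B replaces A's single per-character loop with five str.count scans of the lowercased
-- string (one per vowel), summed — more idiomatic; return value identical on all inputs.

-- ===== PORT A =====
-- literal port: one fold over the lowered string, membership test against "aiueoAIUEO"
def jmlvokal (string : String) : Int × Int :=
  let x := "aiueoAIUEO"
  let vok : Int := (PySem.Str.lower string).toList.foldl
    (fun vok car => if PySem.Chars.isIn [car] x.toList then vok + 1 else vok) 0
  let vokal : Int := PySem.Str.len string
  (vokal, vok)

-- ===== PORT B =====
-- literal port of Source B: lower once, sum of five .count scans
def jmlvokal_alt (string : String) : Int × Int :=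
  let low := PySem.Str.lower string
  let vok : Int := ("aiueo".toList.map (fun v => (PySem.Str.count low (String.ofList [v]) : Int))).sum
  (PySem.Str.len string, vok)

-- ===== PRECONDITION & SPEC =====
def Spec_jmlvokal (string : String) (out : Int × Int) : Prop := out = jmlvokal_alt string
instance (string : String) (out : Int × Int) : Decidable (Spec_jmlvokal string out) := by unfold Spec_jmlvokal; infer_instance

-- ===== CLAIM (what is proved, stated in full; the proofs are below) =====
def Claim_equal_jmlvokal : Prop := ∀ (string : String), Dom_jmlvokal string → Spec_jmlvokal string (jmlvokal string)

-- ===== LEMMAS AND PROOFS =====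

-- Python str.count with a single-character needle is List.count
lemma go_singleton (v : Char) : ∀ (fuel : Nat) (l : List Char) (acc : Nat), l.length ≤ fuel →
    PySem.Chars.count.go [v] fuel l acc = acc + l.count v := by
  intro fuel
  induction fuel with
  | zero => intro l acc h; rw [PySem.Chars.count.go.eq_def]; cases l <;> simp_all
  | succ n ih =>
    intro l acc h
    rw [PySem.Chars.count.go.eq_def]
    cases l with
    | nil => simp
    | cons hd t =>
      simp only [List.isPrefixOf, Bool.and_true, List.length_cons] at *
      cases hvb : (v == hd) with
      | true =>
        have hv : v = hd := by simpa using hvb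
        simp only [if_true]
        rw [show ([] : List Char).length + 1 = 1 from rfl, List.drop_one, List.tail_cons,
          ih t (acc + 1) (by omega), List.count_cons]
        have hbv : (hd == v) = true := by simp [hv]
        simp [hbv]; omega
      | false =>
        have hv : v ≠ hd := by simpa using hvb
        simp only [Bool.false_eq_true, if_false]
        rw [ih t acc (by omega), List.count_cons]
        have hbv : (hd == v) = false := by simp; exact fun e => hv e.symm
        simp [hbv]

lemma count_singleton (l : List Char) (v : Char) : PySem.Chars.count l [v] = l.count v := by
  simpa [PySem.Chars.count] using go_singleton v l.length l 0 le_rfl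

-- a lowered character is never an uppercase letter
lemma isupper_lowerChar (c : Char) : PySem.Chars.isupper (PySem.Chars.lowerChar c) = false := by
  simp only [PySem.Chars.lowerChar]
  split
  · rename_i h
    simp only [PySem.Chars.isupper, Bool.and_eq_true, decide_eq_true_eq] at h
    have hA : 65 ≤ c.toNat := h.1
    have hZ : c.toNat ≤ 90 := h.2
    have hv : (Char.ofNat (c.toNat + 32)).toNat = c.toNat + 32 := by
      rw [Char.toNat_ofNat, if_pos]; exact Or.inl (by omega)
    have hn : ¬ (Char.ofNat (c.toNat + 32) ≤ 'Z') := by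
      intro hle
      have : (Char.ofNat (c.toNat + 32)).toNat ≤ 90 := hle
      omega
    simp [PySem.Chars.isupper, hn]
  · rename_i h; simpa [PySem.Chars.isupper] using h

-- on non-uppercase characters, membership in "aiueoAIUEO" is membership in the 5 vowels
lemma mem_vowels (c : Char) (hc : PySem.Chars.isupper c = false) :
    decide (PySem.Chars.isIn [c] ("aiueoAIUEO".toList) = true)
      = decide (c ∈ (['a','i','u','e','o'] : List Char)) := by
  have h1 : PySem.Chars.isIn [c] ("aiueoAIUEO".toList) = true ↔ c ∈ "aiueoAIUEO".toList := by
    rw [PySem.Chars.isIn_iff_infix]; exact List.singleton_infix_iff c _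
  have hA : c ≠ 'A' := fun e => by rw [e] at hc; exact absurd hc (by decide)
  have hI : c ≠ 'I' := fun e => by rw [e] at hc; exact absurd hc (by decide)
  have hU : c ≠ 'U' := fun e => by rw [e] at hc; exact absurd hc (by decide)
  have hE : c ≠ 'E' := fun e => by rw [e] at hc; exact absurd hc (by decide)
  have hO : c ≠ 'O' := fun e => by rw [e] at hc; exact absurd hc (by decide)
  have h2 : c ∈ "aiueoAIUEO".toList ↔ c ∈ (['a','i','u','e','o'] : List Char) := by
    rw [show "aiueoAIUEO".toList = ['a','i','u','e','o','A','I','U','E','O'] from rfl]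
    simp only [List.mem_cons, List.not_mem_nil, or_false]
    tauto
  rw [decide_eq_decide]
  rw [h1, h2]

-- the sum of the five vowel counts is the count of vowel positions
lemma sum_counts (l : List Char) :
    ((['a','i','u','e','o'] : List Char).map (fun v => (l.count v : Int))).sum
      = (l.countP (fun c => decide (c ∈ (['a','i','u','e','o'] : List Char))) : Int) := by
  induction l with
  | nil => simp
  | cons hd t ih =>
    simp only [List.map, List.sum_cons, List.sum_nil, List.count_cons] at *
    rw [List.countP_cons]
    push_cast at *
    by_cases h : hd ∈ (['a','i','u','e','o'] : List Char)
    · fin_cases h <;> simp_all <;> omega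
    · have hp : decide (hd ∈ (['a','i','u','e','o'] : List Char)) = false := by simp [h]
      simp only [List.mem_cons, List.not_mem_nil, or_false] at h
      simp only [not_or] at h
      rw [hp]
      simp only [if_false, Bool.false_eq_true]
      obtain ⟨h1, h2, h3, h4, h5⟩ := h
      have hcp : List.countP (fun c => decide (c = 'a') || (decide (c = 'i') || (decide (c = 'u') ||
            (decide (c = 'e') || decide (c = 'o'))))) t
          = List.countP (fun c => decide (c ∈ (['a','i','u','e','o'] : List Char))) t := by
        apply List.countP_congr; intro a _; simp
      simp only [beq_iff_eq, h1, h2, h3, h4, h5, if_false, add_zero]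
      omega

-- ===== VERDICT (by name: the statement is the Claim_ definition above) =====
theorem jmlvokal_spec : Claim_equal_jmlvokal := by
  unfold Claim_equal_jmlvokal
  intro string _
  unfold Spec_jmlvokal jmlvokal jmlvokal_alt
  simp only [PySem.Str.toList_lower, PySem.Str.count_eq]
  refine Prod.ext rfl ?_
  rw [PySem.List.foldl_ite_add_one (fun car => PySem.Chars.isIn [car] ("aiueoAIUEO".toList) = true)]
  rw [List.countP_congr (q := fun c => decide (c ∈ (['a','i','u','e','o'] : List Char)))
    (fun c hc => by
      rcases List.mem_map.mp hc with ⟨c0, _, rfl⟩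
      rw [mem_vowels _ (isupper_lowerChar c0)])]
  rw [← sum_counts]
  simp [count_singleton]
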